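-- pv_equiv track=rewrite | github.com/ifyij/Programming-Labs | lab04.py | get_all_coords
-- ===== SOURCE A (Python) =====
-- def get_all_coords(dimensions, prev =() ):
--     """
--     Given:
--     dimesnisons: the dimensions of the board in the form of a tuple
--     prev: the previous values in the target coord before the dimension of that iteration
--     returns all of the possible coordinates in the board as a set of tuples
--     """
--     ans = set()
--     list_dim = list(dimensions)
--
--     #base case
--     if len(list_dim)==1: #the last element of the dimension tuple
--         for x in range(list_dim[0]):
--             current_coord = prev + (x,) #adds the last number of the coordinate
--             ans.add(current_coord) #adds it to the set of coordinates
--         return ans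
--
--     #recursive case
--     for x in range(list_dim.pop(0)):
--         current_coord = prev + (x,) #building up a coordinate
--         ans = set.union(ans,(get_all_coords((*list_dim,),current_coord)))
--     return ans
-- ===== SOURCE B (Python) =====
-- def get_all_coords(dimensions, prev=()):
--     dims = tuple(dimensions)
--     n = len(dims)
--     # iterative depth-first traversal with an explicit stack of
--     # (prefix, next-index, accumulated-set) frames instead of recursion
--     stack = [[prev, 0, set()]]
--     while True:
--         prefix, x, acc = stack[-1]
--         level = len(prefix) - len(prev)
--         if level == n - 1:
--             ret = set()
--             for v in range(dims[level]):
--                 ret.add(prefix + (v,))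
--         elif x < dims[level]:
--             stack.append([prefix + (x,), 0, set()])
--             continue
--         else:
--             ret = acc
--         stack.pop()
--         if not stack:
--             return ret
--         top = stack[-1]
--         top[2] = set.union(top[2], ret)
--         top[1] += 1
-- ===== Notes on version B (the rewrite author's own statement) =====
-- stated objective: alternative
-- what changed: Replaces the recursion over the dimension suffix by an iterative depth-first traversal with an explicit stack of (prefix, next-index, accumulator) frames, avoiding Python recursion entirely.
-- outside the precondition, e.g. on get_all_coords((), ()): A raises IndexError, B raises IndexError
import Mathlib
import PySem

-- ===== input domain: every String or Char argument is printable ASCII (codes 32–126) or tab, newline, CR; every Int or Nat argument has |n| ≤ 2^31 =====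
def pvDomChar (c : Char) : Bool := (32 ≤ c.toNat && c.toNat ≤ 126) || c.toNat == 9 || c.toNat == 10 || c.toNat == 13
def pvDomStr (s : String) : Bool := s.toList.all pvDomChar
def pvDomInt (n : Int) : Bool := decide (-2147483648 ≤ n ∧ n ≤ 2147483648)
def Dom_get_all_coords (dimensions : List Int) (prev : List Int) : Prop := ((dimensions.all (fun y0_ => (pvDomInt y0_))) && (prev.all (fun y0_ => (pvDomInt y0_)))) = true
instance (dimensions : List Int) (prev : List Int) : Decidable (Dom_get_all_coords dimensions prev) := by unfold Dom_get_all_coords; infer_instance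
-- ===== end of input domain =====

-- B replaces A's recursion over the dimension suffix by an iterative depth-first
-- traversal with an explicit stack of (prefix, next-index, accumulator) frames (objective: alternative).

-- ===== PORT A =====
-- Literal port of A: base case len(list_dim)==1 adds prev+(x,) to a set; recursive case
-- pops the first dimension and unions the recursive results.  On dimensions = [] the
-- Python raises IndexError (list.pop(0) on []) — excluded by Pre_; the port returns [].
def get_all_coords : (dimensions : List Int) → (prev : List Int) → List (List Int)
  | [], _ => []
  | [d], prev =>
      (PySem.List.pyRange 0 d 1).foldl
        (fun ans x => PySem.Set.add ans (prev ++ [x])) PySem.Set.empty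
  | d :: rest@(_ :: _), prev =>
      (PySem.List.pyRange 0 d 1).foldl
        (fun ans x => PySem.Set.union ans (get_all_coords rest (prev ++ [x]))) PySem.Set.empty

-- ===== PORT B =====
-- Fuel bound for B's while-loop (the number of loop iterations of a fresh frame):
-- a totality guard only, it does not change what the loop computes on admitted inputs.
def pvFuel : List Int → Nat
  | [] => 1
  | [_] => 1
  | d :: e :: rest => 1 + d.toNat * (1 + pvFuel (e :: rest))

-- B's while-loop, step for step: the stack holds (prefix, next-index, accumulator)
-- frames; a leaf level builds its set by adds, a finished frame delivers its set to
-- the frame below via set.union.  (Python's dims[level] is in range on every admitted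
-- run; pyGetD is its total form.)
def get_all_coords_loop (dims prev : List Int) : Nat → List (List Int × Int × List (List Int)) → List (List Int)
  | 0, _ => []
  | _ + 1, [] => []
  | fuel + 1, (p, x, acc) :: rest =>
      let level : Int := (p.length : Int) - (prev.length : Int)
      if level = (dims.length : Int) - 1 then
        let ret := (PySem.List.pyRange 0 (PySem.List.pyGetD dims level 0) 1).foldl
          (fun s v => PySem.Set.add s (p ++ [v])) PySem.Set.empty
        match rest with
        | [] => ret
        | (p2, x2, acc2) :: r2 =>
            get_all_coords_loop dims prev fuel ((p2, x2 + 1, PySem.Set.union acc2 ret) :: r2)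
      else if x < PySem.List.pyGetD dims level 0 then
        get_all_coords_loop dims prev fuel ((p ++ [x], 0, PySem.Set.empty) :: (p, x, acc) :: rest)
      else
        match rest with
        | [] => acc
        | (p2, x2, acc2) :: r2 =>
            get_all_coords_loop dims prev fuel ((p2, x2 + 1, PySem.Set.union acc2 acc) :: r2)

def get_all_coords_alt (dimensions : List Int) (prev : List Int) : List (List Int) :=
  get_all_coords_loop dimensions prev (pvFuel dimensions) [(prev, 0, PySem.Set.empty)]

-- ===== PRECONDITION & SPEC =====
-- Pre_ excludes only dimensions = [], on which the Python A raises IndexError (and B does too).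
def Pre_get_all_coords (dimensions : List Int) (prev : List Int) : Prop := dimensions ≠ []
instance (dimensions : List Int) (prev : List Int) : Decidable (Pre_get_all_coords dimensions prev) := by unfold Pre_get_all_coords; infer_instance
def pvWitness_get_all_coords : List Int × List Int := ([2, 3], [7])

def Spec_get_all_coords (dimensions : List Int) (prev : List Int) (out : List (List Int)) : Prop := out = get_all_coords_alt dimensions prev
instance (dimensions : List Int) (prev : List Int) (out : List (List Int)) : Decidable (Spec_get_all_coords dimensions prev out) := by unfold Spec_get_all_coords; infer_instance

-- ===== CLAIM (what is proved, stated in full; the proofs are below) =====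
def Claim_equal_get_all_coords : Prop := ∀ (dimensions : List Int) (prev : List Int), Dom_get_all_coords dimensions prev → Pre_get_all_coords dimensions prev → Spec_get_all_coords dimensions prev (get_all_coords dimensions prev)

-- ===== LEMMAS AND PROOFS =====

/-- The Cartesian product `pvProd ds prev`: all coordinates extending `prev` by one
index per dimension of `ds`, in lexicographic order. Reference shape for both ports. -/
def pvProd : List Int → List Int → List (List Int)
  | [], prev => [prev]
  | d :: ds, prev => (PySem.List.pyRange 0 d 1).flatMap (fun x => pvProd ds (prev ++ [x]))

theorem pvProd_prefix : ∀ (ds : List Int) (prev c : List Int), c ∈ pvProd ds prev → prev <+: c := by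
  intro ds
  induction ds with
  | nil =>
      intro prev c hc
      simp [pvProd] at hc
      simp [hc]
  | cons d ds ih =>
      intro prev c hc
      simp [pvProd, List.mem_flatMap] at hc
      obtain ⟨x, _, hmem⟩ := hc
      exact (List.prefix_append prev [x]).trans (ih _ _ hmem)

/-- Results for different first indices are disjoint: the extended prefixes differ. -/
theorem pvProd_disjoint (ds : List Int) (prev c : List Int) (x y : Int) (hxy : x ≠ y)
    (hx : c ∈ pvProd ds (prev ++ [x])) (hy : c ∈ pvProd ds (prev ++ [y])) : False := by
  have px := pvProd_prefix ds _ c hx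
  have py := pvProd_prefix ds _ c hy
  have hlen : (prev ++ [x]).length = (prev ++ [y]).length := by simp
  rcases List.prefix_or_prefix_of_prefix px py with h | h
  · have := List.IsPrefix.eq_of_length h hlen
    exact hxy (by simpa using List.append_cancel_left this)
  · have := List.IsPrefix.eq_of_length h hlen.symm
    exact hxy (by simpa using (List.append_cancel_left this).symm)

theorem pvProd_nodup : ∀ (ds : List Int) (prev : List Int), (pvProd ds prev).Nodup := by
  intro ds
  induction ds with
  | nil => intro prev; simp [pvProd]
  | cons d ds ih =>
      intro prev
      rw [pvProd]
      refine List.nodup_flatMap.2 ⟨fun x _ => ih _, ?_⟩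
      apply List.Pairwise.imp_of_mem ?_ (PySem.List.pairwise_lt_pyRange_one 0 d)
      intro x y _ _ hlt c hcx hcy
      exact pvProd_disjoint ds prev c x y (by omega) hcx hcy

/-- Folding `Set.union` over pairwise-disjoint nodup pieces concatenates them. -/
theorem foldl_union_eq_flatMap (g : Int → List (List Int)) :
    ∀ (l : List Int) (acc : List (List Int)), acc.Nodup →
    (∀ x ∈ l, (g x).Nodup) →
    (∀ x ∈ l, ∀ c ∈ g x, c ∉ acc) →
    l.Pairwise (fun x y => ∀ c ∈ g x, c ∉ g y) →
    l.foldl (fun s x => PySem.Set.union s (g x)) acc = acc ++ l.flatMap g := by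
  intro l
  induction l with
  | nil => intro acc _ _ _ _; simp
  | cons x l ih =>
      intro acc hacc hnd hdis hpw
      rw [List.foldl_cons]
      have hux : PySem.Set.union acc (g x) = acc ++ g x :=
        PySem.Set.update_eq_append_of_disjoint acc (g x) (hnd x (by simp))
          (fun c hc => hdis x (by simp) c hc)
      rw [hux, ih (acc ++ g x)]
      · simp
      · exact List.Nodup.append hacc (hnd x (by simp))
          (fun c hc hcg => hdis x (by simp) c hcg hc)
      · intro y hy; exact hnd y (by simp [hy])
      · intro y hy c hc
        simp only [List.mem_append]
        rintro (hca | hcx)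
        · exact hdis y (by simp [hy]) c hc hca
        · exact (List.pairwise_cons.mp hpw).1 y hy c hcx hc
      · exact (List.pairwise_cons.mp hpw).2

/-- A computes the Cartesian product in lexicographic order. -/
theorem a_eq_pvProd : ∀ (ds : List Int) (prev : List Int), ds ≠ [] →
    get_all_coords ds prev = pvProd ds prev := by
  intro ds
  induction ds with
  | nil => intro prev h; exact absurd rfl h
  | cons d rest ih =>
      intro prev _
      cases rest with
      | nil =>
          rw [get_all_coords, pvProd]
          rw [← PySem.Set.update_map_eq_foldl_add, PySem.Set.update_empty,
            PySem.Set.ofList_eq_self_of_nodup _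
              ((PySem.List.nodup_pyRange_one 0 d).map
                (fun a b h => by simpa using List.append_cancel_left h)),
            List.map_eq_flatMap]
          rfl
      | cons d2 rest2 =>
          rw [get_all_coords, pvProd]
          rw [foldl_union_eq_flatMap]
          · simp
            congr 1
            funext x
            exact ih (prev ++ [x]) (by simp)
          · simp [PySem.Set.empty]
          · intro x _
            rw [ih (prev ++ [x]) (by simp)]
            exact pvProd_nodup _ _
          · intro x _ c _
            simp [PySem.Set.empty]
          · apply List.Pairwise.imp_of_mem ?_ (PySem.List.pairwise_lt_pyRange_one 0 d)
            intro x y _ _ hlt c hcx hcy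
            rw [ih (prev ++ [x]) (by simp)] at hcx
            rw [ih (prev ++ [y]) (by simp)] at hcy
            exact pvProd_disjoint _ prev c x y (by omega) hcx hcy

-- ===== B-side machinery: the stack machine computes pvProd =====

/-- The value a frame `(p, x, acc)` of B's machine will eventually deliver. -/
def pvVal (dims prev p : List Int) (x : Int) (acc : List (List Int)) : List (List Int) :=
  acc ++ (PySem.List.pyRange x (dims.getD (p.length - prev.length) 0) 1).flatMap
    (fun x' => pvProd (dims.drop (p.length - prev.length + 1)) (p ++ [x']))

/-- Delivering a value `v` up through the waiting frames. -/
def pvUnwind (dims prev : List Int) : List (List Int × Int × List (List Int)) → List (List Int) → List (List Int)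
  | [], v => v
  | (p2, x2, acc2) :: r, v =>
      pvUnwind dims prev r (pvVal dims prev p2 (x2 + 1) (PySem.Set.union acc2 v))

/-- A well-formed frame: its prefix extends `prev`, its level is a real level, and its
accumulator is the lexicographic union of its already finished children. -/
def pvWf (dims prev : List Int) : List Int × Int × List (List Int) → Prop
  | (p, x, acc) =>
    ∃ ys : List Int, p = prev ++ ys ∧ ys.length < dims.length ∧ 0 ≤ x ∧
      acc = (PySem.List.pyRange 0 x 1).flatMap
        (fun x' => pvProd (dims.drop (ys.length + 1)) (p ++ [x']))

/-- Extra facts about the top frame: its counter never passed its dimension, and a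
leaf-level top frame is fresh. -/
def pvTop (dims prev : List Int) : List Int × Int × List (List Int) → Prop
  | (p, x, acc) =>
    pvWf dims prev (p, x, acc) ∧
      (x = 0 ∨ x ≤ dims.getD (p.length - prev.length) 0) ∧
      (p.length - prev.length = dims.length - 1 → x = 0 ∧ acc = [])

/-- The frames below the top: each waits (counter strictly inside its range, level not
a leaf) for the frame above, whose prefix it determines. -/
def pvChain (dims prev : List Int) : (List Int × Int × List (List Int)) → List (List Int × Int × List (List Int)) → Prop
  | _, [] => True
  | (p, _, _), (p2, x2, acc2) :: r =>
      p = p2 ++ [x2] ∧ x2 < dims.getD (p2.length - prev.length) 0 ∧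
        p2.length - prev.length + 1 < dims.length ∧
        pvWf dims prev (p2, x2, acc2) ∧ pvChain dims prev (p2, x2, acc2) r
termination_by _ r => r.length

/-- Remaining loop iterations of the top frame at counter `x` over the dimension suffix `s`. -/
def pvW (x : Int) : List Int → Nat
  | [] => 1
  | [_] => 1
  | d :: e :: rest => 1 + (d - x).toNat * (1 + pvFuel (e :: rest))

/-- Remaining loop iterations of the whole machine state. -/
def pvMu (dims prev : List Int) : List Int × Int × List (List Int) → List (List Int × Int × List (List Int)) → Nat
  | (p, x, _), rest =>
    pvW x (dims.drop (p.length - prev.length)) +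
      (rest.map (fun g => pvW (g.2.1 + 1) (dims.drop (g.1.length - prev.length)))).sum

theorem pvW_zero (s : List Int) : pvW 0 s = pvFuel s := by
  match s with
  | [] => rfl
  | [_] => rfl
  | d :: e :: rest => simp [pvW, pvFuel]


theorem pvW_pos (x : Int) (s : List Int) : 1 ≤ pvW x s := by
  match s with
  | [] => simp [pvW]
  | [_] => simp [pvW]
  | d :: e :: rest => simp [pvW]

/-- One expansion step of the product along the dimension list. -/
theorem pvProd_expand (dims q : List Int) (k : Nat) (hk : k < dims.length) :
    pvProd (dims.drop k) q =
      (PySem.List.pyRange 0 (dims.getD k 0) 1).flatMap (fun x' => pvProd (dims.drop (k + 1)) (q ++ [x'])) := by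
  rw [List.drop_eq_getElem_cons hk, pvProd, List.getD_eq_getElem dims 0 hk]

/-- A fresh frame's eventual value is the full sub-product below its prefix. -/
theorem pvVal_fresh (dims prev q : List Int) (hq : q.length - prev.length < dims.length) :
    pvVal dims prev q 0 [] = pvProd (dims.drop (q.length - prev.length)) q := by
  rw [pvVal, pvProd_expand dims q _ hq]
  simp

/-- Delivering a finished sub-product into an accumulator extends its range by one. -/
theorem pvUnion_eq_update (s t : List (List Int)) : PySem.Set.union s t = PySem.Set.update s t := rfl

theorem pvUnion_snoc (ds q : List Int) (x2 : Int) (hx0 : 0 ≤ x2) :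
    PySem.Set.union ((PySem.List.pyRange 0 x2 1).flatMap (fun x' => pvProd ds (q ++ [x'])))
        (pvProd ds (q ++ [x2])) =
      (PySem.List.pyRange 0 (x2 + 1) 1).flatMap (fun x' => pvProd ds (q ++ [x'])) := by
  rw [pvUnion_eq_update, PySem.Set.update_eq_append_of_disjoint _ _ (pvProd_nodup _ _) ?_,
    PySem.List.pyRange_one_succ_right hx0, List.flatMap_append]
  · simp
  · intro c hc hmem
    obtain ⟨x', hx', hmem'⟩ := List.mem_flatMap.mp hmem
    have : x' < x2 := (PySem.List.mem_pyRange_one.mp hx').2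
    exact pvProd_disjoint ds q c x' x2 (by omega) hmem' hc

theorem pvChain_congr (dims prev p : List Int) (x x' : Int) (acc acc' : List (List Int)) :
    ∀ (l : List (List Int × Int × List (List Int))),
    pvChain dims prev (p, x, acc) l → pvChain dims prev (p, x', acc') l := by
  intro l
  match l with
  | [] => intro _; simp [pvChain]
  | (p2, x2, acc2) :: r =>
      intro hc
      rw [pvChain] at hc ⊢
      exact hc


/-- The leaf branch builds exactly the sub-product below its prefix. -/
theorem pvLeaf (dims p : List Int) (k : Nat) (hk : k < dims.length) (hl : k = dims.length - 1) :
    (PySem.List.pyRange 0 (dims.getD k 0) 1).foldl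
        (fun s v => PySem.Set.add s (p ++ [v])) PySem.Set.empty =
      pvProd (dims.drop k) p := by
  rw [← PySem.Set.update_map_eq_foldl_add, PySem.Set.update_empty,
    PySem.Set.ofList_eq_self_of_nodup _
      ((PySem.List.nodup_pyRange_one 0 (dims.getD k 0)).map
        (fun a b h => by simpa using List.append_cancel_left h)),
    pvProd_expand dims p k hk, List.drop_eq_nil_of_le (by omega), List.map_eq_flatMap]
  rfl

/-- Delivering a finished value to the waiting frame below and continuing. -/
theorem pvDeliver (dims prev : List Int) (fuel : Nat)
    (ih : ∀ (p : List Int) (x : Int) (acc : List (List Int)) (rest : List (List Int × Int × List (List Int))),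
      pvTop dims prev (p, x, acc) → pvChain dims prev (p, x, acc) rest → pvMu dims prev (p, x, acc) rest ≤ fuel →
      get_all_coords_loop dims prev fuel ((p, x, acc) :: rest) = pvUnwind dims prev rest (pvVal dims prev p x acc))
    (p2 : List Int) (x2 : Int) (acc2 ret : List (List Int)) (r2 : List (List Int × Int × List (List Int)))
    (hwf2 : pvWf dims prev (p2, x2, acc2))
    (hx2 : x2 < dims.getD (p2.length - prev.length) 0)
    (hl2 : p2.length - prev.length + 1 < dims.length)
    (hch2 : pvChain dims prev (p2, x2, acc2) r2)
    (hret : ret = pvProd (dims.drop (p2.length - prev.length + 1)) (p2 ++ [x2]))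
    (hmu : pvMu dims prev (p2, x2 + 1, PySem.Set.union acc2 ret) r2 ≤ fuel) :
    get_all_coords_loop dims prev fuel ((p2, x2 + 1, PySem.Set.union acc2 ret) :: r2)
      = pvUnwind dims prev ((p2, x2, acc2) :: r2) ret := by
  obtain ⟨ys2, hp2, hyl2, hx20, hacc2⟩ := hwf2
  have hpl2 : p2.length = prev.length + ys2.length := by simp [hp2]
  have hplen2 : p2.length - prev.length = ys2.length := by omega
  have hacc' : PySem.Set.union acc2 ret =
      (PySem.List.pyRange 0 (x2 + 1) 1).flatMap
        (fun x' => pvProd (dims.drop (ys2.length + 1)) (p2 ++ [x'])) := by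
    rw [hacc2, hret, hplen2]
    exact pvUnion_snoc _ _ _ hx20
  rw [pvUnwind]
  refine ih p2 (x2 + 1) (PySem.Set.union acc2 ret) r2
    ⟨⟨ys2, hp2, hyl2, by omega, hacc'⟩,
      Or.inr (by omega),
      by intro h; exfalso; omega⟩
    (pvChain_congr dims prev p2 x2 (x2 + 1) acc2 (PySem.Set.union acc2 ret) r2 hch2) hmu

/-- Unfolding B's loop in its push branch, for any shape of the lower stack. -/
theorem loop_push (dims prev p : List Int) (x : Int) (acc : List (List Int))
    (rest : List (List Int × Int × List (List Int))) (fuel : Nat)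
    (hcond : ¬ ((p.length : Int) - (prev.length : Int) = (dims.length : Int) - 1))
    (hxd : x < PySem.List.pyGetD dims ((p.length : Int) - (prev.length : Int)) 0) :
    get_all_coords_loop dims prev (fuel + 1) ((p, x, acc) :: rest)
      = get_all_coords_loop dims prev fuel ((p ++ [x], 0, PySem.Set.empty) :: (p, x, acc) :: rest) := by
  cases rest <;> rw [get_all_coords_loop, if_neg hcond, if_pos hxd]

/-- Machine correctness: with enough fuel, B's loop on a valid stack unwinds the top
frame's eventual value through the waiting frames. -/
theorem loop_correct (dims prev : List Int) : ∀ (fuel : Nat) (p : List Int) (x : Int) (acc : List (List Int))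
    (rest : List (List Int × Int × List (List Int))),
    pvTop dims prev (p, x, acc) → pvChain dims prev (p, x, acc) rest → pvMu dims prev (p, x, acc) rest ≤ fuel →
    get_all_coords_loop dims prev fuel ((p, x, acc) :: rest) = pvUnwind dims prev rest (pvVal dims prev p x acc) := by
  intro fuel
  induction fuel with
  | zero =>
      intro p x acc rest _ _ hmu
      exfalso
      have := pvW_pos x (dims.drop (p.length - prev.length))
      rw [pvMu] at hmu
      omega
  | succ fuel ih =>
      intro p x acc rest htop hchain hmu
      obtain ⟨⟨ys, hp, hyl, hx0, hacc⟩, hxle, hleaf⟩ := htop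
      have hpl : p.length = prev.length + ys.length := by simp [hp]
      have hplen : p.length - prev.length = ys.length := by omega
      have hlev : ((p.length : Int) - (prev.length : Int)) = ((ys.length : Nat) : Int) := by omega
      have hgetD : PySem.List.pyGetD dims ((p.length : Int) - (prev.length : Int)) 0
          = dims.getD ys.length 0 := by
        rw [hlev, PySem.List.pyGetD_natCast]
      by_cases hl : ys.length = dims.length - 1
      · -- leaf level
        obtain ⟨hx, hac⟩ := hleaf (by omega)
        subst hx
        subst hac
        have hcond : ((p.length : Int) - (prev.length : Int)) = (dims.length : Int) - 1 := by omega
        have hret : (PySem.List.pyRange 0 (PySem.List.pyGetD dims ((p.length : Int) - (prev.length : Int)) 0) 1).foldl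
            (fun s v => PySem.Set.add s (p ++ [v])) PySem.Set.empty
            = pvProd (dims.drop ys.length) p := by
          rw [hgetD]
          exact pvLeaf dims p ys.length (by omega) hl
        have hval : pvVal dims prev p 0 [] = pvProd (dims.drop ys.length) p := by
          rw [pvVal_fresh dims prev p (by omega), hplen]
        match rest with
        | [] =>
            rw [get_all_coords_loop, if_pos hcond, pvUnwind, hval, hret]
        | (p2, x2, acc2) :: r2 =>
            rw [pvChain] at hchain
            obtain ⟨hpp2, hx2lt, hl2, hwf2, hch2⟩ := hchain
            have hpl2 : p2.length = prev.length + (ys.length - 1) := by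
              have : p.length = p2.length + 1 := by simp [hpp2]
              omega
            rw [get_all_coords_loop, if_pos hcond, hret, hval]
            exact pvDeliver dims prev fuel ih p2 x2 acc2 _ r2 hwf2 hx2lt hl2 hch2
              (by rw [hpp2, show ys.length = p2.length - prev.length + 1 from by omega])
              (by
                rw [pvMu] at hmu
                rw [pvMu]
                have := pvW_pos 0 (dims.drop (p.length - prev.length))
                simp only [List.map_cons, List.sum_cons] at hmu
                omega)
      · -- not a leaf level
        have hcond : ¬ ((p.length : Int) - (prev.length : Int)) = (dims.length : Int) - 1 := by omega
        by_cases hxd : x < dims.getD ys.length 0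
        · -- push a child frame
          have hxd' : x < PySem.List.pyGetD dims ((p.length : Int) - (prev.length : Int)) 0 := by
            rw [hgetD]; exact hxd
          rw [loop_push dims prev p x acc rest fuel hcond hxd']
          have hchild : pvVal dims prev (p ++ [x]) 0 PySem.Set.empty
              = pvProd (dims.drop (ys.length + 1)) (p ++ [x]) := by
            show pvVal dims prev (p ++ [x]) 0 [] = _
            rw [pvVal_fresh dims prev (p ++ [x]) (by simp; omega)]
            congr 2
            simp
            omega
          rw [ih (p ++ [x]) 0 PySem.Set.empty ((p, x, acc) :: rest)
            ⟨⟨ys ++ [x], by rw [hp, List.append_assoc], by simp; omega, le_refl 0,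
              by rw [PySem.List.pyRange_one_eq_nil (le_refl 0)]; rfl⟩,
              Or.inl rfl, fun _ => ⟨rfl, rfl⟩⟩
            (by
              rw [pvChain]
              exact ⟨rfl, by rw [hplen]; exact hxd, by omega, ⟨ys, hp, hyl, hx0, hacc⟩, hchain⟩)
            (by
              have hyl1 : ys.length + 1 < dims.length := by omega
              have hd : dims.getD ys.length 0 = dims[ys.length] :=
                List.getD_eq_getElem dims 0 (by omega)
              rw [pvMu] at hmu
              rw [pvMu]
              simp only [List.map_cons, List.sum_cons]
              have hllen : (p ++ [x]).length - prev.length = ys.length + 1 := by simp; omega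
              rw [hllen, pvW_zero, hplen,
                List.drop_eq_getElem_cons (show ys.length < dims.length from by omega),
                List.drop_eq_getElem_cons hyl1, pvW]
              rw [hplen, List.drop_eq_getElem_cons (show ys.length < dims.length from by omega),
                List.drop_eq_getElem_cons hyl1, pvW] at hmu
              rw [show (dims[ys.length] - x).toNat = (dims[ys.length] - (x + 1)).toNat + 1 from by omega,
                Nat.succ_mul] at hmu
              omega)]
          rw [pvUnwind]
          congr 1
          rw [hchild, hacc, pvUnion_snoc (dims.drop (ys.length + 1)) p x hx0,
            pvVal, pvVal, hplen, PySem.List.pyRange_one_succ_right hx0,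
            PySem.List.pyRange_one_cons hxd]
          simp [List.flatMap_append]
        · -- frame finished: deliver the accumulator
          have hxd' : ¬ x < PySem.List.pyGetD dims ((p.length : Int) - (prev.length : Int)) 0 := by
            rw [hgetD]; exact hxd
          have hvacc : pvVal dims prev p x acc = acc := by
            rw [pvVal, hplen, PySem.List.pyRange_one_eq_nil (by omega)]
            simp
          have haccfull : acc = pvProd (dims.drop ys.length) p := by
            rw [hacc, pvProd_expand dims p ys.length (by omega)]
            rcases hxle with h0 | hle
            · rw [h0, PySem.List.pyRange_one_eq_nil (le_refl 0),
                PySem.List.pyRange_one_eq_nil (by omega : dims.getD ys.length 0 ≤ 0)]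
            · rw [hplen] at hle
              rw [show x = dims.getD ys.length 0 by omega]
          match rest with
          | [] =>
              rw [get_all_coords_loop, if_neg hcond, if_neg hxd', pvUnwind, hvacc]
          | (p2, x2, acc2) :: r2 =>
              rw [pvChain] at hchain
              obtain ⟨hpp2, hx2lt, hl2, hwf2, hch2⟩ := hchain
              rw [get_all_coords_loop, if_neg hcond, if_neg hxd', hvacc]
              exact pvDeliver dims prev fuel ih p2 x2 acc2 _ r2 hwf2 hx2lt hl2 hch2
                (by
                  have hpl2 : p.length = p2.length + 1 := by simp [hpp2]
                  obtain ⟨ys2, hp2, -, -, -⟩ := hwf2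
                  have hpl2' : p2.length = prev.length + ys2.length := by simp [hp2]
                  rw [haccfull, hpp2, show ys.length = p2.length - prev.length + 1 from by omega])
                (by
                  rw [pvMu] at hmu
                  rw [pvMu]
                  have := pvW_pos x (dims.drop (p.length - prev.length))
                  simp only [List.map_cons, List.sum_cons] at hmu
                  omega)

theorem alt_eq_pvProd (ds prev : List Int) (h : ds ≠ []) :
    get_all_coords_alt ds prev = pvProd ds prev := by
  have hlen : 0 < ds.length := by cases ds <;> simp_all
  rw [get_all_coords_alt,
    loop_correct ds prev (pvFuel ds) prev 0 PySem.Set.empty []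
      ⟨⟨[], by simp, by simpa using hlen, le_refl 0,
        by rw [PySem.List.pyRange_one_eq_nil (le_refl 0)]; rfl⟩,
        Or.inl rfl, fun _ => ⟨rfl, rfl⟩⟩
      (by simp [pvChain])
      (by rw [pvMu]; simp [pvW_zero])]
  rw [pvUnwind]
  show pvVal ds prev prev 0 [] = _
  rw [pvVal_fresh ds prev prev (by simpa using hlen)]
  simp

-- ===== VERDICT (by name: the statement is the Claim_ definition above) =====
theorem get_all_coords_spec : Claim_equal_get_all_coords := by
  intro dimensions prev _ hpre
  unfold Spec_get_all_coords
  rw [alt_eq_pvProd dimensions prev hpre, a_eq_pvProd dimensions prev hpre]
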